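-- pv_equiv track=rewrite | github.com/dev-eze/python_algorithm | 그리디연습.py | get_min_count
-- ===== SOURCE A (Python) =====
-- def get_min_count(n, k):
--     count = 0
--     while n != 1:
--         if n % k == 0:
--             n //= k
--         else:
--             n -= 1
--         count += 1
--     return count
-- ===== SOURCE B (Python) =====
-- def get_min_count(n, k):
--     # Base-k digit expansion: each non-leading digit costs digit subtractions
--     # plus one division; the leading digit costs digit-1 subtractions.
--     # Total = sum(digits) + len(digits) - 2.
--     digits = []
--     while n != 0:
--         digits.append(n % k)
--         n //= k
--     return sum(digits) + len(digits) - 2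
-- ===== Notes on version B (the rewrite author's own statement) =====
-- stated objective: faster
-- what changed: A removes one unit per iteration (subtract 1, or one division when divisible); B instead builds the base-k digit list of n once and returns sum(digits) + len(digits) - 2, a closed formula over the digit expansion, in O(log_k n).
-- outside the precondition, e.g. on get_min_count(1, 0): A returns 0, B raises ZeroDivisionError; on get_min_count(1, 1): A returns 0, B does not finish within the time limit; on get_min_count(4, -2): A returns 2, B returns 0
import Mathlib
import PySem

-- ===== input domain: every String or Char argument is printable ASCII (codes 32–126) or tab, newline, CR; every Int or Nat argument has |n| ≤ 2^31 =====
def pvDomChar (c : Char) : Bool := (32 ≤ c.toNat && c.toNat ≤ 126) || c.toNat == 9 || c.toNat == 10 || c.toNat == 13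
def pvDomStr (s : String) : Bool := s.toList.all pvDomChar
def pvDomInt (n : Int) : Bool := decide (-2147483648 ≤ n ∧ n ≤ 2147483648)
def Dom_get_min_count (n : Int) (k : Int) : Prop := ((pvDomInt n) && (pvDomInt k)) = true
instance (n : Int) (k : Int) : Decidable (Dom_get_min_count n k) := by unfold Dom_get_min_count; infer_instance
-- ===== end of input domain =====

-- B replaces A's one-step loop (subtract 1, or divide when divisible) by a closed formula over
-- the base-k digit expansion of n: sum(digits) + len(digits) - 2. Objective: faster (asymptotic).

-- ===== PORT A =====
-- A's while-loop as structural recursion on a fuel counter; n.toNat fuel is enough on Pre_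
-- (n decreases by at least 1 each iteration while it stays ≥ 1).
def aLoop (k : Int) : Nat → Int → Int → Int
  | 0, _, count => count
  | fuel + 1, n, count =>
    if n ≠ 1 then
      if PySem.Int.mod n k = 0 then aLoop k fuel (PySem.Int.floordiv n k) (count + 1)
      else aLoop k fuel (n - 1) (count + 1)
    else count

def get_min_count (n : Int) (k : Int) : Int := aLoop k n.toNat n 0

-- ===== PORT B =====
-- B's digit-collection loop: while n ≠ 0, append n % k and divide; fuel n.toNat suffices on Pre_.
def bDigits (k : Int) : Nat → Int → List Int
  | 0, _ => []
  | fuel + 1, n =>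
    if n ≠ 0 then PySem.Int.mod n k :: bDigits k fuel (PySem.Int.floordiv n k) else []

def get_min_count_alt (n : Int) (k : Int) : Int :=
  (bDigits k n.toNat n).sum + (bDigits k n.toNat n).length - 2

-- ===== PRECONDITION & SPEC =====
-- Pre_ restricts to the problem's natural domain n ≥ 1, k ≥ 2. Outside it A raises (k = 0 with
-- n ≠ 1), diverges (k = 1, or n ≤ 0 with k ≥ 0), or — for k ≤ -2 — returns step counts produced by
-- Python's divisor-sign floor division flipping n's sign, an accident of the implementation that
-- B's digit expansion does not reproduce (B diverges, raises, or returns a different count there).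
def Pre_get_min_count (n : Int) (k : Int) : Prop := 1 ≤ n ∧ 2 ≤ k
instance (n : Int) (k : Int) : Decidable (Pre_get_min_count n k) := by unfold Pre_get_min_count; infer_instance
def pvWitness_get_min_count : Int × Int := (10, 3)

def Spec_get_min_count (n : Int) (k : Int) (out : Int) : Prop := out = get_min_count_alt n k
instance (n : Int) (k : Int) (out : Int) : Decidable (Spec_get_min_count n k out) := by unfold Spec_get_min_count; infer_instance

-- ===== CLAIM (what is proved, stated in full; the proofs are below) =====
def Claim_equal_get_min_count : Prop := ∀ (n : Int) (k : Int), Dom_get_min_count n k → Pre_get_min_count n k → Spec_get_min_count n k (get_min_count n k)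

-- ===== LEMMAS AND PROOFS =====

lemma ediv_lt_self' (n k : Int) (hn : 1 ≤ n) (hk : 2 ≤ k) : n / k < n := by
  have hdm : k * (n / k) + n % k = n := Int.mul_ediv_add_emod n k
  have hr0 : 0 ≤ n % k := Int.emod_nonneg n (by omega)
  have hq0 : 0 ≤ n / k := Int.ediv_nonneg (by omega) (by omega)
  nlinarith

lemma bDigits_zero (k : Int) (f : Nat) : bDigits k f 0 = [] := by
  cases f <;> simp [bDigits]

-- Fuel irrelevance: any fuel ≥ n.toNat gives the same digit list (for 0 ≤ n, 2 ≤ k).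
lemma bDigits_fuel (k : Int) (hk : 2 ≤ k) :
    ∀ (N : Nat) (n : Int) (f f' : Nat), 0 ≤ n → n.toNat ≤ N →
      n.toNat ≤ f → n.toNat ≤ f' → bDigits k f n = bDigits k f' n := by
  intro N
  induction N with
  | zero =>
    intro n f f' hn hN _ _
    have : n = 0 := by omega
    subst this; simp [bDigits_zero]
  | succ N ih =>
    intro n f f' hn hN hf hf'
    by_cases h0 : n = 0
    · subst h0; simp [bDigits_zero]
    · obtain ⟨fa, rfl⟩ : ∃ m, f = m + 1 := ⟨f - 1, by omega⟩
      obtain ⟨fb, rfl⟩ : ∃ m, f' = m + 1 := ⟨f' - 1, by omega⟩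
      rw [bDigits, bDigits]
      simp only [ne_eq, h0, not_false_eq_true, if_true]
      have hk0 : (0:Int) < k := by omega
      have hq0 : 0 ≤ n / k := Int.ediv_nonneg (by omega) (by omega)
      have hqlt : n / k < n := ediv_lt_self' n k (by omega) hk
      rw [PySem.Int.floordiv_eq_ediv_of_pos hk0]
      rw [ih (n / k) fa fb hq0 (by omega) (by omega) (by omega)]

-- Value of the digit formula from canonical fuel.
def dval (k n : Int) : Int :=
  (bDigits k n.toNat n).sum + (bDigits k n.toNat n).length

-- Unfold dval one step for n ≥ 1.
lemma dval_step (k n : Int) (hk : 2 ≤ k) (hn : 1 ≤ n) :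
    dval k n = n % k + dval k (n / k) + 1 := by
  have hk0 : (0:Int) < k := by omega
  obtain ⟨f, hf⟩ : ∃ m, n.toNat = m + 1 := ⟨n.toNat - 1, by omega⟩
  have hq0 : 0 ≤ n / k := Int.ediv_nonneg (by omega) (by omega)
  have hqlt : n / k < n := ediv_lt_self' n k hn hk
  unfold dval
  rw [hf, bDigits]
  simp only [ne_eq, show ¬ n = 0 by omega, not_false_eq_true, if_true]
  rw [PySem.Int.floordiv_eq_ediv_of_pos hk0, PySem.Int.mod_eq_emod_of_pos hk0]
  rw [bDigits_fuel k hk (n / k).toNat (n / k) f (n / k).toNat hq0 le_rfl (by omega) le_rfl]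
  simp [List.sum_cons]
  ring

lemma dval_one (k : Int) (hk : 2 ≤ k) : dval k 1 = 2 := by
  rw [dval_step k 1 hk le_rfl]
  have h1 : (1:Int) % k = 1 := Int.emod_eq_of_lt (by omega) (by omega)
  have h2 : (1:Int) / k = 0 := Int.ediv_eq_zero_of_lt (by omega) (by omega)
  rw [h1, h2]
  unfold dval
  simp [bDigits_zero]

-- Subtracting 1 when k ∤ n lowers dval by exactly 1.
lemma dval_sub_one (k n : Int) (hk : 2 ≤ k) (hn : 2 ≤ n) (hr : n % k ≠ 0) :
    dval k n = dval k (n - 1) + 1 := by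
  have hk0 : (0:Int) < k := by omega
  have hr0 : 0 ≤ n % k := Int.emod_nonneg n (by omega)
  have hrk : n % k < k := Int.emod_lt_of_pos n hk0
  have hdm : k * (n / k) + n % k = n := Int.mul_ediv_add_emod n k
  have e1 : (n - 1) / k = n / k := by
    conv_lhs => rw [show n - 1 = (n % k - 1) + k * (n / k) by omega]
    rw [Int.add_mul_ediv_left _ _ (by omega : k ≠ 0),
        Int.ediv_eq_zero_of_lt (by omega) (by omega), zero_add]
  have e2 : (n - 1) % k = n % k - 1 := by
    conv_lhs => rw [show n - 1 = (n % k - 1) + k * (n / k) by omega]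
    rw [Int.add_mul_emod_self_left, Int.emod_eq_of_lt (by omega) (by omega)]
  rw [dval_step k n hk (by omega), dval_step k (n - 1) hk (by omega), e1, e2]
  ring

-- Main invariant: A's loop computes count + dval n - 2.
lemma aLoop_dval (k : Int) (hk : 2 ≤ k) :
    ∀ (N : Nat) (n count : Int) (fa : Nat), 1 ≤ n → n.toNat ≤ N →
      n.toNat ≤ fa → aLoop k fa n count = count + dval k n - 2 := by
  intro N
  induction N with
  | zero => intro n count fa hn hN _; omega
  | succ N ih =>
    intro n count fa hn hN hfa
    have hk0 : (0:Int) < k := by omega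
    obtain ⟨fa', rfl⟩ : ∃ m, fa = m + 1 := ⟨fa - 1, by omega⟩
    rw [aLoop]
    by_cases h1 : n = 1
    · subst h1
      simp [dval_one k hk]
    · simp only [ne_eq, h1, not_false_eq_true, if_true,
        PySem.Int.mod_eq_emod_of_pos hk0, PySem.Int.floordiv_eq_ediv_of_pos hk0]
      have hn2 : 2 ≤ n := by omega
      by_cases hr : n % k = 0
      · rw [if_pos hr]
        have hdm : k * (n / k) + n % k = n := Int.mul_ediv_add_emod n k
        have hq0 : 0 ≤ n / k := Int.ediv_nonneg (by omega) (by omega)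
        have hq1 : 1 ≤ n / k := by nlinarith
        have hqlt : n / k < n := ediv_lt_self' n k (by omega) hk
        rw [ih (n / k) (count + 1) fa' hq1 (by omega) (by omega)]
        rw [dval_step k n hk (by omega), hr]
        ring
      · rw [if_neg hr]
        rw [ih (n - 1) (count + 1) fa' (by omega) (by omega) (by omega)]
        rw [dval_sub_one k n hk hn2 hr]
        ring

-- ===== VERDICT (by name: the statement is the Claim_ definition above) =====
theorem get_min_count_spec : Claim_equal_get_min_count := by
  intro n k _ hpre
  unfold Spec_get_min_count get_min_count get_min_count_alt
  have h := aLoop_dval k hpre.2 n.toNat n 0 n.toNat hpre.1 le_rfl le_rfl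
  unfold dval at h
  omega
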